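-- pv_equiv track=rewrite | github.com/truny887/AdventOfCode | Day2/main.py | checksumCalculator
-- ===== SOURCE A (Python) =====
-- from collections import Counter
--
-- def checksumCalculator(input):
--     duplicates = 0
--     triplicates = 0
--     for item in input:
--         countedList = Counter(item)
--         if 2 in countedList.values():
--             duplicates += 1
--
--         if 3 in countedList.values():
--             triplicates += 1
--
--     return duplicates*triplicates
-- ===== SOURCE B (Python) =====
-- def _run_lengths(s):
--     lengths = []
--     i = 0
--     n = len(s)
--     while i < n:
--         j = i + 1
--         while j < n and s[j] == s[i]:
--             j += 1
--         lengths.append(j - i)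
--         i = j
--     return lengths
--
-- def checksumCalculator(input):
--     duplicates = 0
--     triplicates = 0
--     for item in input:
--         lengths = _run_lengths(sorted(item))
--         if 2 in lengths:
--             duplicates += 1
--         if 3 in lengths:
--             triplicates += 1
--     return duplicates * triplicates
-- ===== Notes on version B (the rewrite author's own statement) =====
-- stated objective: alternative
-- what changed: Per-item letter multiplicities are derived by sorting the string and scanning run lengths (sort-then-group) instead of building a Counter hash map; the 2/3 checks test membership in the run-length list.
import Mathlib
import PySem

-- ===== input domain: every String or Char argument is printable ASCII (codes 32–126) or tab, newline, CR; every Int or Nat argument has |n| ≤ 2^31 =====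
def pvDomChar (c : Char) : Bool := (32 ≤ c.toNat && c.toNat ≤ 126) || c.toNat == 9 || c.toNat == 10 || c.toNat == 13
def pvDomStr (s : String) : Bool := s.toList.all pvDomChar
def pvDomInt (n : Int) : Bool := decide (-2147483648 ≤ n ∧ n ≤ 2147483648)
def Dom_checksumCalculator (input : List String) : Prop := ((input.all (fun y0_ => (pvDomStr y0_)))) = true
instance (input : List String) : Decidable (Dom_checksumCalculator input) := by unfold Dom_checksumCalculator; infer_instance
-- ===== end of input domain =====

-- B replaces A's Counter hash map by sort-then-run-length scanning per item; return values are identical.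

-- ===== PORT A =====
-- literal port of A: Counter per item, '2 in values' / '3 in values' checks, product at the end
def checksumCalculator (input : List String) : Int :=
  let r := input.foldl (fun (acc : Int × Int) item =>
    let countedList := PySem.Dict.counter item.toList
    let duplicates := if (2 : Int) ∈ countedList.values then acc.1 + 1 else acc.1
    let triplicates := if (3 : Int) ∈ countedList.values then acc.2 + 1 else acc.2
    (duplicates, triplicates)) ((0 : Int), (0 : Int))
  r.1 * r.2

-- ===== PORT B =====
-- port of Source B's _run_lengths: the inner while-loop advancing j over equal chars is the
-- takeWhile/dropWhile split of the remaining list (exact: j - i = 1 + length of the equal run after s[i])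
def runLengths : List Char → List Nat
  | [] => []
  | c :: rest =>
      (1 + (rest.takeWhile (· == c)).length) :: runLengths (rest.dropWhile (· == c))
  termination_by s => s.length
  decreasing_by
    have := List.length_dropWhile_le (· == c) rest
    simpa using Nat.lt_succ_of_le this

def checksumCalculator_alt (input : List String) : Int :=
  let r := input.foldl (fun (acc : Int × Int) item =>
    let lengths := runLengths (PySem.List.sorted item.toList (fun x => x) false)
    let duplicates := if 2 ∈ lengths then acc.1 + 1 else acc.1
    let triplicates := if 3 ∈ lengths then acc.2 + 1 else acc.2
    (duplicates, triplicates)) ((0 : Int), (0 : Int))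
  r.1 * r.2

-- ===== PRECONDITION & SPEC =====
def Spec_checksumCalculator (input : List String) (out : Int) : Prop := out = checksumCalculator_alt input
instance (input : List String) (out : Int) : Decidable (Spec_checksumCalculator input out) := by unfold Spec_checksumCalculator; infer_instance

-- ===== CLAIM (what is proved, stated in full; the proofs are below) =====
def Claim_equal_checksumCalculator : Prop := ∀ (input : List String), Dom_checksumCalculator input → Spec_checksumCalculator input (checksumCalculator input)

-- ===== LEMMAS AND PROOFS =====

-- run lengths of a sorted list are exactly the multiplicities of its elements
theorem mem_runLengths (s : List Char) (hs : s.Pairwise (· ≤ ·)) (n : Nat) (hn : n ≠ 0) :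
    n ∈ runLengths s ↔ ∃ c ∈ s, s.count c = n := by
  induction s using runLengths.induct with
  | case1 => simp [runLengths, hn.symm]
  | case2 c rest ih =>
    have hsplit := List.takeWhile_append_dropWhile (p := (· == c)) (l := rest)
    set t := rest.takeWhile (· == c) with ht
    set d := rest.dropWhile (· == c) with hd
    have hrest : rest = t ++ d := hsplit.symm
    have hhead : ∀ y ∈ rest, c ≤ y := (List.pairwise_cons.mp hs).1
    have hdp : d.Pairwise (· ≤ ·) :=
      ((List.pairwise_cons.mp hs).2).sublist (List.dropWhile_sublist _)
    have htall : ∀ x ∈ t, x = c := by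
      intro x hx
      have := List.mem_takeWhile_imp (l := rest) (p := (· == c)) hx
      simpa using this
    -- every element of d differs from c
    have hdne : ∀ x ∈ d, x ≠ c := by
      cases hde : d with
      | nil => simp
      | cons x0 d' =>
        have hx0ne : ¬ (x0 == c) = true := by
          have := List.head?_dropWhile_not (p := (· == c)) (l := rest)
          rw [← hd, hde] at this; simpa using this
        have hx0mem : x0 ∈ rest := by rw [hrest, hde]; simp
        have hx0gt : c < x0 :=
          lt_of_le_of_ne (hhead _ hx0mem) (fun h => hx0ne (by simp [h]))
        intro x hx
        rcases List.mem_cons.mp hx with rfl | hx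
        · exact ne_of_gt hx0gt
        · have hle : x0 ≤ x :=
            (List.pairwise_cons.mp (hde ▸ hdp)).1 x hx
          exact ne_of_gt (lt_of_lt_of_le hx0gt hle)
    have hcount_c : (c :: rest).count c = 1 + t.length := by
      have h1 : t.count c = t.length := by
        rw [List.count_eq_length]; intro x hx; exact ((htall x hx) ▸ rfl)
      have h2 : d.count c = 0 := by
        rw [List.count_eq_zero]; intro hmem; exact hdne c hmem rfl
      rw [hrest]; simp [List.count_append, h1, h2]; omega
    have hcount_d : ∀ x ∈ d, (c :: rest).count x = d.count x := by
      intro x hx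
      have hxc : x ≠ c := hdne x hx
      have h1 : t.count x = 0 := by
        rw [List.count_eq_zero]; intro hmem; exact hxc (htall x hmem)
      rw [hrest, List.count_cons_of_ne (Ne.symm hxc), List.count_append, h1, Nat.zero_add]
    rw [runLengths]
    rw [← ht, ← hd]
    simp only [List.mem_cons]
    constructor
    · rintro (h | h)
      · exact ⟨c, by simp, by omega⟩
      · obtain ⟨x, hxd, hxn⟩ := (ih hdp).mp h
        exact ⟨x, by rw [hrest]; simp [hxd], by rw [hcount_d x hxd]; exact hxn⟩
    · rintro ⟨x, hxmem, hxn⟩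
      by_cases hxc : x = c
      · left; subst hxc; omega
      · right
        have hxrest : x ∈ rest := by
          rcases hxmem with h | h
          · exact absurd h hxc
          · exact h
        have hxd : x ∈ d := by
          rw [hrest] at hxrest
          rcases List.mem_append.mp hxrest with h | h
          · exact absurd (htall x h) hxc
          · exact h
        exact (ih hdp).mpr ⟨x, hxd, by rw [← hcount_d x hxd]; exact hxn⟩

theorem mem_values_counter (cs : List Char) (n : Int) :
    n ∈ (PySem.Dict.counter cs).values ↔ ∃ c ∈ cs, (cs.count c : Int) = n := by
  have hv : (PySem.Dict.counter cs).values
      = (PySem.Set.ofList cs).map (fun k => ((cs.count k : Int))) := by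
    show ((PySem.Dict.counter cs).items.map (·.2)) = _
    rw [PySem.Dict.items_counter]
    simp
  rw [hv]
  simp only [List.mem_map]
  constructor
  · rintro ⟨c, hc, h⟩
    exact ⟨c, (PySem.Set.mem_ofList _ _).mp hc, h⟩
  · rintro ⟨c, hc, h⟩
    exact ⟨c, (PySem.Set.mem_ofList _ _).mpr hc, h⟩

-- the two per-item flags coincide (for n = 2 and n = 3)
theorem flag_eq (cs : List Char) (m : Int) (n : Nat) (hmn : m = (n : Int)) (hn : n ≠ 0) :
    (m ∈ (PySem.Dict.counter cs).values)
      ↔ n ∈ runLengths (PySem.List.sorted cs (fun x => x) false) := by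
  have hperm : (PySem.List.sorted cs (fun x => x) false).Perm cs :=
    PySem.List.sorted_perm cs (fun x => x) false
  have hpw : (PySem.List.sorted cs (fun x => x) false).Pairwise (· ≤ ·) := by
    have := PySem.List.sorted_pairwise (xs := cs) (key := fun x => x)
    simpa using this
  subst hmn
  rw [mem_values_counter, mem_runLengths _ hpw n hn]
  constructor
  · rintro ⟨c, hc, h⟩
    refine ⟨c, hperm.mem_iff.mpr hc, ?_⟩
    rw [hperm.count_eq]
    exact_mod_cast h
  · rintro ⟨c, hc, h⟩
    refine ⟨c, hperm.mem_iff.mp hc, ?_⟩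
    rw [← hperm.count_eq]
    exact_mod_cast h

-- ===== VERDICT (by name: the statement is the Claim_ definition above) =====
theorem checksumCalculator_spec : Claim_equal_checksumCalculator := by
  intro input _
  show checksumCalculator input = checksumCalculator_alt input
  unfold checksumCalculator checksumCalculator_alt
  have hstep : ∀ (acc : Int × Int) (item : String),
      (fun (acc : Int × Int) item =>
        let countedList := PySem.Dict.counter item.toList
        let duplicates := if (2 : Int) ∈ countedList.values then acc.1 + 1 else acc.1
        let triplicates := if (3 : Int) ∈ countedList.values then acc.2 + 1 else acc.2
        (duplicates, triplicates)) acc item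
      = (fun (acc : Int × Int) item =>
        let lengths := runLengths (PySem.List.sorted item.toList (fun x => x) false)
        let duplicates := if 2 ∈ lengths then acc.1 + 1 else acc.1
        let triplicates := if 3 ∈ lengths then acc.2 + 1 else acc.2
        (duplicates, triplicates)) acc item := by
    intro acc item
    simp only
    rw [if_congr (flag_eq item.toList 2 2 (by norm_num) (by omega)) rfl rfl,
        if_congr (flag_eq item.toList 3 3 (by norm_num) (by omega)) rfl rfl]
  have hfold := List.foldl_ext (l := input) (a := ((0 : Int), (0 : Int)))
    (H := fun acc item _ => hstep acc item)
  rw [hfold]
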